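-- pv_equiv track=rewrite | github.com/kyungkoo/ktor-client-skill | ktor-mobile-client/scripts/scan_ktor_mobile_client.py | strip_toml_comment
-- ===== SOURCE A (Python) =====
-- def strip_toml_comment(line: str) -> str:
--     in_string = False
--     result: list[str] = []
--     for char in line:
--         if char == '"':
--             in_string = not in_string
--         if char == "#" and not in_string:
--             break
--         result.append(char)
--     return "".join(result).strip()
-- ===== SOURCE B (Python) =====
-- def strip_toml_comment(line: str) -> str:
--     idx = line.find('#')
--     while idx != -1:
--         if line[:idx].count('"') % 2 == 0:
--             return line[:idx].strip()
--         idx = line.find('#', idx + 1)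
--     return line.strip()
-- ===== Notes on version B (the rewrite author's own statement) =====
-- stated objective: faster
-- what changed: Replaces A's stateful char-by-char scan (in-string toggle plus a result-list accumulator) by index jumps: locate each candidate comment start with str.find and decide by the parity of the double-quote count of the preceding prefix, returning a slice.
import Mathlib
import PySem

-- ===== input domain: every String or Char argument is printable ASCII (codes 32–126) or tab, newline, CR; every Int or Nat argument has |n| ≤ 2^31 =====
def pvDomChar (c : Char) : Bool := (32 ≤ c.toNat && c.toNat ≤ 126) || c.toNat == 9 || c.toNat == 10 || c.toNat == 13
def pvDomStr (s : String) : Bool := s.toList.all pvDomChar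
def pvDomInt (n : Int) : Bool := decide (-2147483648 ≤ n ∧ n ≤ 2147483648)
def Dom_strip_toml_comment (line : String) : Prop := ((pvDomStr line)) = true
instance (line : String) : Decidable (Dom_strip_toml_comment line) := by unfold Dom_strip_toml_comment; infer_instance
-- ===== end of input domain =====

-- B replaces A's stateful char-by-char scan by str.find index jumps plus quote-parity counting on the prefix (measured faster at large sizes).

-- ===== PORT A =====
-- A's loop: toggle in_string at '"', break at '#' outside a string, accumulate chars; then strip.
def stripGoA : List Char → Bool → List Char
  | [], _ => []
  | c :: rest, inString =>
    let inString' := if c = '"' then !inString else inString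
    if c = '#' ∧ inString' = false then []
    else c :: stripGoA rest inString'

def strip_toml_comment (line : String) : String :=
  PySem.Str.strip (String.ofList (stripGoA line.toList false))

-- ===== PORT B =====
-- Cited by searchB for termination: a found '#' lies at a valid index ≥ start.
theorem pvFindHash_bounds (line : String) (start : Nat) (h : start ≤ line.toList.length)
    (hne : PySem.Str.findFrom line "#" (start : Int) none ≠ -1) :
    start ≤ (PySem.Str.findFrom line "#" (start : Int) none).toNat ∧
      (PySem.Str.findFrom line "#" (start : Int) none).toNat < line.toList.length := by
  rw [PySem.Str.findFrom_eq] at hne ⊢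
  obtain ⟨h1, h2, -⟩ := PySem.Chars.findFrom_natCast_spec line.toList "#".toList start h hne
  refine ⟨by omega, ?_⟩
  by_contra hlen
  rw [List.drop_eq_nil_of_le (by omega)] at h2
  simpa using List.eq_nil_of_prefix_nil h2

-- B's loop: idx = line.find('#', start); stop at -1 (strip whole line) or when the
-- prefix line[:idx] contains an even number of '"' (strip line[:idx]); else continue past idx.
def searchB (line : String) (start : Nat) (h : start ≤ line.toList.length) : String :=
  let idx := PySem.Str.findFrom line "#" (start : Int) none
  if hidx : idx = -1 then PySem.Str.strip line
  else if PySem.Str.count (PySem.Str.slice line none (some idx)) "\"" % 2 = 0 then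
    PySem.Str.strip (PySem.Str.slice line none (some idx))
  else searchB line (idx.toNat + 1)
    (by have := pvFindHash_bounds line start h hidx; omega)
termination_by line.toList.length - start
decreasing_by have := pvFindHash_bounds line start h hidx; omega

def strip_toml_comment_alt (line : String) : String :=
  searchB line 0 (Nat.zero_le _)

-- ===== PRECONDITION & SPEC =====
def Spec_strip_toml_comment (line : String) (out : String) : Prop := out = strip_toml_comment_alt line
instance (line : String) (out : String) : Decidable (Spec_strip_toml_comment line out) := by unfold Spec_strip_toml_comment; infer_instance

-- ===== CLAIM (what is proved, stated in full; the proofs are below) =====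
def Claim_equal_strip_toml_comment : Prop := ∀ (line : String), Dom_strip_toml_comment line → Spec_strip_toml_comment line (strip_toml_comment line)

-- ===== LEMMAS AND PROOFS =====

-- `goodB q cs i`: A would break at index i when its initial in_string state was q.
def goodB (q : Bool) (cs : List Char) (i : Nat) : Bool :=
  (cs.getD i ' ' == '#') && (decide ((cs.take i).count '"' % 2 = 1) == q)

-- first break position
def firstP (cs : List Char) (q : Bool) : Option Nat :=
  (List.range cs.length).find? (goodB q cs)

def cutAt (cs : List Char) (r : Option Nat) : List Char :=
  match r with
  | none => cs
  | some i => cs.take i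

theorem goodB_succ (q : Bool) (c : Char) (rest : List Char) (i : Nat) :
    goodB q (c :: rest) (i + 1) = goodB (if c = '"' then !q else q) rest i := by
  simp only [goodB, List.getD_cons_succ, List.take_succ_cons, List.count_cons]
  by_cases hc : c = '"'
  · simp only [hc, beq_iff_eq]
    have : (rest.take i).count '"' % 2 = 1 ↔ ¬ ((rest.take i).count '"' + 1) % 2 = 1 := by omega
    cases q <;> by_cases hp : (rest.take i).count '"' % 2 = 1 <;> simp_all
  · simp [hc]

theorem count_go_singleton (c : Char) :
    ∀ (l : List Char) (fuel acc : Nat), l.length ≤ fuel →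
      PySem.Chars.count.go [c] fuel l acc = acc + l.count c := by
  intro l
  induction l with
  | nil => intro fuel acc h; cases fuel <;> simp [PySem.Chars.count.go]
  | cons x t ih =>
    intro fuel acc h
    cases fuel with
    | zero => simp at h
    | succ f =>
      simp only [PySem.Chars.count.go]
      simp only [List.length_cons] at h
      by_cases hx : c = x
      · have hpre : List.isPrefixOf [c] (x :: t) = true := by
          simp [List.isPrefixOf, hx]
        simp only [hpre, if_pos]
        rw [show ([c] : List Char).length = 1 from rfl, List.drop_one,
          List.tail_cons, ih f (acc + 1) (by omega)]
        simp [List.count_cons, hx.symm]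
        omega
      · have hpre : List.isPrefixOf [c] (x :: t) = false := by
          simp [List.isPrefixOf, hx]
        simp only [hpre]
        rw [if_neg (by simp), ih f acc (by omega)]
        simp [List.count_cons, (Ne.symm hx : x ≠ c)]

theorem chars_count_singleton (l : List Char) (c : Char) :
    PySem.Chars.count l [c] = l.count c := by
  simp [PySem.Chars.count, count_go_singleton c l l.length 0 le_rfl]

-- A's scan computes the cut at the first break position.
theorem stripGoA_eq (cs : List Char) : ∀ q, stripGoA cs q = cutAt cs (firstP cs q) := by
  induction cs with
  | nil => intro q; simp [stripGoA, firstP, cutAt]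
  | cons c rest ih =>
    intro q
    have hrange : List.range (c :: rest).length = 0 :: (List.range rest.length).map Nat.succ := by
      simp [List.range_succ_eq_map]
    rw [stripGoA, firstP, hrange, List.find?_cons]
    have h0 : goodB q (c :: rest) 0 = ((c == '#') && (false == q)) := by
      simp [goodB]
    by_cases hbreak : c = '#' ∧ (if c = '"' then !q else q) = false
    · obtain ⟨hc, hq⟩ := hbreak
      have hcq : c ≠ '"' := by rw [hc]; decide
      rw [if_pos ⟨hc, hq⟩]
      rw [if_neg hcq] at hq
      rw [show goodB q (c :: rest) 0 = true by rw [h0, hc, hq]; simp]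
      simp [cutAt]
    · rw [if_neg hbreak]
      have hg0 : goodB q (c :: rest) 0 = false := by
        rw [h0]
        by_cases hc : c = '#'
        · have hcq : c ≠ '"' := by rw [hc]; decide
          rw [if_neg hcq] at hbreak
          have : q ≠ false := fun hq => hbreak ⟨hc, hq⟩
          simp [this]
        · simp [hc]
      rw [hg0]
      have hfun : (goodB q (c :: rest) ∘ Nat.succ) = goodB (if c = '"' then !q else q) rest := by
        funext i
        simp only [Function.comp_apply, Nat.succ_eq_add_one]
        exact goodB_succ q c rest i
      rw [List.find?_map, hfun, ih (if c = '"' then !q else q)]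
      unfold firstP
      cases (List.range rest.length).find? (goodB (if c = '"' then !q else q) rest) with
      | none => simp [cutAt]
      | some i => simp [cutAt]

-- first-true characterisation of find? over range
theorem find?_range_eq_some {p : Nat → Bool} {n j : Nat} (hj : j < n) (hp : p j = true)
    (hmin : ∀ i < j, p i = false) : (List.range n).find? p = some j := by
  rw [List.find?_eq_some_iff_append]
  refine ⟨hp, List.range j, List.drop (j + 1) (List.range n), ?_, ?_⟩
  · have hlen : j < (List.range n).length := by simpa using hj
    have hd : List.drop j (List.range n) = j :: List.drop (j + 1) (List.range n) := by
      rw [List.drop_eq_getElem_cons hlen]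
      simp
    calc List.range n = List.take j (List.range n) ++ List.drop j (List.range n) :=
          (List.take_append_drop _ _).symm
      _ = List.range j ++ j :: List.drop (j + 1) (List.range n) := by
          rw [hd, List.take_range, Nat.min_eq_left hj.le]
  · intro a ha
    rw [List.mem_range] at ha
    simp [hmin a ha]

-- hash prefix at i ↔ cs[i] = '#'
theorem hash_prefix_iff (cs : List Char) (i : Nat) (h : i < cs.length) :
    ['#'] <+: cs.drop i ↔ cs[i] = '#' := by
  rw [List.drop_eq_getElem_cons h]
  constructor
  · intro hp
    obtain ⟨t, ht⟩ := hp
    exact (List.cons.inj ht).1.symm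
  · intro he
    rw [he]
    exact ⟨_, rfl⟩

-- no break position at or after `start` when find('#', start) = -1
theorem no_hash_after (cs : List Char) (start i : Nat) (hs : start ≤ i) (hi : i < cs.length)
    (hno : ¬ ['#'] <:+: cs.drop start) : goodB false cs i = false := by
  have hne : cs[i] ≠ '#' := by
    intro he
    exact hno (((hash_prefix_iff cs i hi).mpr he).isInfix.trans
      (by rw [show i = start + (i - start) by omega, ← List.drop_drop]
          exact (List.drop_suffix _ _).isInfix))
  simp [goodB, List.getElem?_eq_getElem hi, hne]

-- B's search computes the same cut, stripped, provided no break position lies before start.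
theorem searchB_eq_aux : ∀ (n : Nat) (line : String) (start : Nat) (h : start ≤ line.toList.length),
    line.toList.length - start ≤ n →
    (∀ i < start, goodB false line.toList i = false) →
    searchB line start h
      = PySem.Str.strip (String.ofList (cutAt line.toList (firstP line.toList false))) := by
  intro n
  induction n with
  | zero =>
    intro line start h hn hinv
    rw [searchB]
    have hse : start = line.toList.length := by omega
    split
    · rename_i hidx
      have hfp : firstP line.toList false = none := by
        unfold firstP
        rw [List.find?_eq_none]
        intro x hx
        rw [List.mem_range] at hx
        by_cases hxs : x < start
        · simp [hinv x hxs]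
        · omega
      rw [hfp]
      simp [cutAt, String.ofList_toList]
    · rename_i hidx
      have := pvFindHash_bounds line start h hidx
      omega
  | succ m ih =>
    intro line start h hn hinv
    rw [searchB]
    split
    · rename_i hidx
      -- no '#' at or after start: the whole line survives
      rw [PySem.Str.findFrom_eq] at hidx
      have hno : ¬ ("#".toList) <:+: line.toList.drop start :=
        (PySem.Chars.findFrom_natCast_eq_neg_one_iff line.toList "#".toList start h).mp hidx
      have hfp : firstP line.toList false = none := by
        unfold firstP
        rw [List.find?_eq_none]
        intro x hx
        rw [List.mem_range] at hx
        by_cases hxs : x < start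
        · simp [hinv x hxs]
        · exact by simp [no_hash_after line.toList start x (by omega) hx hno]
      rw [hfp]
      simp [cutAt, String.ofList_toList]
    · rename_i hidx
      obtain ⟨hge, hlt⟩ := pvFindHash_bounds line start h hidx
      set f := PySem.Str.findFrom line "#" (start : Int) none with hf
      have hCh : f = PySem.Chars.findFrom line.toList "#".toList (start : Int) none := by
        rw [hf, PySem.Str.findFrom_eq]
      have hidx' : PySem.Chars.findFrom line.toList "#".toList (start : Int) none ≠ -1 := by
        rw [← hCh]; exact hidx
      obtain ⟨hsle, hpre, hminp⟩ :=
        PySem.Chars.findFrom_natCast_spec line.toList "#".toList start h hidx'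
      rw [← hCh] at hsle hpre hminp
      have hfnn : (0 : Int) ≤ f := by
        rw [hCh, PySem.Chars.findFrom_natCast line.toList "#".toList start h]
        have hml := PySem.Chars.neg_one_le_find (line.toList.drop start) "#".toList
        split
        · rename_i h1
          exfalso
          apply hidx'
          rw [PySem.Chars.findFrom_natCast line.toList "#".toList start h]
          rw [if_pos h1]
        · omega
      have hhash : line.toList[f.toNat]'hlt = '#' :=
        (hash_prefix_iff line.toList f.toNat hlt).mp hpre
      have hbelow : ∀ i, i < f.toNat → goodB false line.toList i = false := by
        intro i hif
        by_cases hxs : i < start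
        · exact hinv i hxs
        · have hil : i < line.toList.length := by omega
          have hne : line.toList[i] ≠ '#' := fun he =>
            hminp i (by omega) hif ((hash_prefix_iff line.toList i hil).mpr he)
          simp [goodB, List.getElem?_eq_getElem hil, hne]
      have hcount : PySem.Str.count (PySem.Str.slice line none (some f)) "\""
          = (line.toList.take f.toNat).count '"' := by
        rw [PySem.Str.count_eq, PySem.Str.toList_slice, PySem.Chars.slice_eq_listSlice,
          PySem.List.slice_to _ hfnn, show ("\"".toList) = ['"'] from rfl,
          chars_count_singleton]
      split
      · rename_i heven
        rw [hcount] at heven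
        have hgood : goodB false line.toList f.toNat = true := by
          simp [goodB, List.getElem?_eq_getElem hlt, hhash]
          omega
        have hfp : firstP line.toList false = some f.toNat :=
          find?_range_eq_some hlt hgood hbelow
        rw [hfp]
        have hsl : PySem.Str.slice line none (some f)
            = String.ofList (cutAt line.toList (some f.toNat)) := by
          apply String.toList_inj.mp
          rw [PySem.Str.toList_slice, PySem.Chars.slice_eq_listSlice,
            PySem.List.slice_to _ hfnn, String.toList_ofList]
          rfl
        rw [hsl]
      · rename_i hodd
        rw [hcount] at hodd
        have hnotgood : goodB false line.toList f.toNat = false := by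
          simp [goodB, List.getElem?_eq_getElem hlt, hhash]
          omega
        apply ih line (f.toNat + 1) _ (by omega)
        intro i hif
        by_cases hie : i < f.toNat
        · exact hbelow i hie
        · have : i = f.toNat := by omega
          rw [this]; exact hnotgood

theorem searchB_eq (line : String) :
    searchB line 0 (Nat.zero_le _)
      = PySem.Str.strip (String.ofList (cutAt line.toList (firstP line.toList false))) :=
  searchB_eq_aux line.toList.length line 0 (Nat.zero_le _) (by omega) (by omega)

-- ===== VERDICT (by name: the statement is the Claim_ definition above) =====
theorem strip_toml_comment_spec : Claim_equal_strip_toml_comment := by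
  intro line _
  unfold Spec_strip_toml_comment
  rw [strip_toml_comment_alt, searchB_eq line]
  rw [strip_toml_comment, stripGoA_eq]
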